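-- pv_equiv track=rewrite | github.com/GIIO345/GOA_homework | level19/homework/homework.py | ascending_order
-- ===== SOURCE A (Python) =====
-- def ascending_order(lith,litl):
--     res=[]
--     for i in lith:
--         res.append(i)
--     for i in litl:
--         res.append(i)
--     res.sort()
--     return res
-- ===== SOURCE B (Python) =====
-- def ascending_order(lith, litl):
--     a = sorted(lith)
--     b = sorted(litl)
--     res = []
--     i = 0
--     j = 0
--     while i < len(a) and j < len(b):
--         if a[i] <= b[j]:
--             res.append(a[i])
--             i += 1
--         else:
--             res.append(b[j])
--             j += 1
--     res.extend(a[i:])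
--     res.extend(b[j:])
--     return res
-- ===== Notes on version B (the rewrite author's own statement) =====
-- stated objective: alternative
-- what changed: B sorts each input list separately and merges the two sorted lists with an explicit two-pointer loop, instead of appending everything into one list and sorting the concatenation.
import Mathlib
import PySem

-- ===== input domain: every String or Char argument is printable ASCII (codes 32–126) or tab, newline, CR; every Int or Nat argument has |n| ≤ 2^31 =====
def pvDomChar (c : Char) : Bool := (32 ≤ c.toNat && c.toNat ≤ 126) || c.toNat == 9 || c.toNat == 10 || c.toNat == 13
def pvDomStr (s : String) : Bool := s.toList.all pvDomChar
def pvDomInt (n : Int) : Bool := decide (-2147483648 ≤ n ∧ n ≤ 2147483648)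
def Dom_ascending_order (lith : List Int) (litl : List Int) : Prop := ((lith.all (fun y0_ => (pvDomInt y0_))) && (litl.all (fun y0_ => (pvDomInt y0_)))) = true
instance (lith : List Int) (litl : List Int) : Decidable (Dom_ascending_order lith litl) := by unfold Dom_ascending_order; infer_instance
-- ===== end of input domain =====

-- B sorts each input list separately and merges the two sorted lists with a two-pointer loop,
-- instead of sorting the concatenation; same result, an alternative decomposition.

-- ===== PORT A =====
def ascending_order (lith : List Int) (litl : List Int) : List Int :=
  let res : List Int := []
  let res := lith.foldl (fun acc i => acc ++ [i]) res
  let res := litl.foldl (fun acc i => acc ++ [i]) res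
  PySem.List.sorted res (fun x => x) false

-- ===== PORT B =====
-- the while loop of Source B: append the smaller head until one side is exhausted, then the rest
def pvMerge : List Int → List Int → List Int
  | [], ys => ys
  | x :: xs, [] => x :: xs
  | x :: xs, y :: ys =>
    if x ≤ y then x :: pvMerge xs (y :: ys) else y :: pvMerge (x :: xs) ys

def ascending_order_alt (lith : List Int) (litl : List Int) : List Int :=
  let a := PySem.List.sorted lith (fun x => x) false
  let b := PySem.List.sorted litl (fun x => x) false
  pvMerge a b

-- ===== PRECONDITION & SPEC =====
def Spec_ascending_order (lith : List Int) (litl : List Int) (out : List Int) : Prop := out = ascending_order_alt lith litl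
instance (lith : List Int) (litl : List Int) (out : List Int) : Decidable (Spec_ascending_order lith litl out) := by unfold Spec_ascending_order; infer_instance

-- ===== CLAIM (what is proved, stated in full; the proofs are below) =====
def Claim_equal_ascending_order : Prop := ∀ (lith : List Int) (litl : List Int), Dom_ascending_order lith litl → Spec_ascending_order lith litl (ascending_order lith litl)

-- ===== LEMMAS AND PROOFS =====

theorem foldl_append_singleton (xs acc : List Int) :
    xs.foldl (fun acc i => acc ++ [i]) acc = acc ++ xs := by
  induction xs generalizing acc with
  | nil => simp
  | cons x xs ih => simp [List.foldl, ih]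

theorem pvMerge_perm (xs ys : List Int) : (pvMerge xs ys).Perm (xs ++ ys) := by
  induction xs generalizing ys with
  | nil => simp [pvMerge]
  | cons x xs ih =>
    induction ys with
    | nil => simp [pvMerge]
    | cons y ys ihy =>
      by_cases h : x ≤ y
      · simpa [pvMerge, h] using (ih (y :: ys)).cons x
      · simp only [pvMerge, h, if_false]
        refine (ihy.cons y).trans ?_
        exact (List.perm_middle (a := y) (l₁ := x :: xs) (l₂ := ys)).symm

theorem pvMerge_pairwise (xs ys : List Int)
    (hx : xs.Pairwise (· ≤ ·)) (hy : ys.Pairwise (· ≤ ·)) :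
    (pvMerge xs ys).Pairwise (· ≤ ·) := by
  induction xs generalizing ys with
  | nil => simpa [pvMerge] using hy
  | cons x xs ih =>
    induction ys with
    | nil => simpa [pvMerge] using hx
    | cons y ys ihy =>
      rcases List.pairwise_cons.mp hx with ⟨hxall, hxtl⟩
      rcases List.pairwise_cons.mp hy with ⟨hyall, hytl⟩
      by_cases h : x ≤ y
      · simp only [pvMerge, h, if_true]
        refine List.pairwise_cons.mpr ⟨?_, ih (y :: ys) hxtl hy⟩
        intro z hz
        have hz' : z ∈ xs ++ y :: ys := (pvMerge_perm xs (y :: ys)).mem_iff.mp hz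
        rcases List.mem_append.mp hz' with h1 | h1
        · exact hxall z h1
        · rcases List.mem_cons.mp h1 with rfl | h2
          · exact h
          · exact le_trans h (hyall z h2)
      · simp only [pvMerge, h, if_false]
        refine List.pairwise_cons.mpr ⟨?_, ihy hytl⟩
        intro z hz
        have hz' : z ∈ (x :: xs) ++ ys := (pvMerge_perm (x :: xs) ys).mem_iff.mp hz
        have hyx : y ≤ x := le_of_not_ge h
        rcases List.mem_append.mp hz' with h1 | h1
        · rcases List.mem_cons.mp h1 with rfl | h2
          · exact hyx
          · exact le_trans hyx (hxall z h2)
        · exact hyall z h1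

-- ===== VERDICT (by name: the statement is the Claim_ definition above) =====
theorem ascending_order_spec : Claim_equal_ascending_order := by
  intro lith litl _
  unfold Spec_ascending_order ascending_order ascending_order_alt
  simp only [foldl_append_singleton, List.nil_append]
  have hsa := PySem.List.sorted_pairwise (xs := lith) (key := fun x : Int => x)
  have hsb := PySem.List.sorted_pairwise (xs := litl) (key := fun x : Int => x)
  have hperm : (pvMerge (PySem.List.sorted lith (fun x => x) false)
      (PySem.List.sorted litl (fun x => x) false)).Perm (lith ++ litl) := by
    refine (pvMerge_perm _ _).trans ?_
    exact (PySem.List.sorted_perm ..).append (PySem.List.sorted_perm ..)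
  exact PySem.List.sorted_id_eq_of_perm_of_pairwise (hp := hperm)
    (hs := pvMerge_pairwise _ _ hsa hsb)
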